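-- pv_equiv track=rewrite | github.com/YousefElsayed2398/Projects | yelsayed_257_PA7.py | calc_res
-- ===== SOURCE A (Python) =====
-- def calc_res(some_list, res=0):
--     if some_list == []: #returns zero once the string is empty
--         return res
--     if some_list[0] == 0:  #makes it so that if it's 0 it's skipped over
--         return calc_res(some_list[1:],res)  #moves to the one after the 0
--     pan = 0  #empty val to use in my calculations
--     if some_list[0] % 2 == 0:  #checks if the val is even but divisibility
--         pan = some_list[0] * res  #multiplies the val with the res val
--         return calc_res(some_list[1:],pan)  #adds it to the stack and recalls the function
--     elif some_list[0] %2 != 0:  #checks for if it's not divisible, odd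
--         pan = res + some_list[0] #adds the 'odd' val with the res
--         return calc_res(some_list[1:],pan)  #stacks the odd val and recalls the function
-- ===== SOURCE B (Python) =====
-- def calc_res(some_list, res=0):
--     # Each element is an affine map on the accumulator (even x: r -> x*r,
--     # odd x: r -> r + x, 0: identity). Compose them right-to-left into
--     # coefficients (m, a); the answer is m*res + a.
--     m, a = 1, 0
--     for x in reversed(some_list):
--         if x == 0:
--             continue
--         if x % 2 == 0:
--             m = m * x
--         else:
--             a = a + m * x
--     return m * res + a
-- ===== Notes on version B (the rewrite author's own statement) =====
-- stated objective: alternative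
-- what changed: B treats each element as an affine map on the accumulator and composes the maps right-to-left into coefficients (m, a), returning m*res + a, instead of A's tail recursion over list slices that threads the accumulator left-to-right.
import Mathlib
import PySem

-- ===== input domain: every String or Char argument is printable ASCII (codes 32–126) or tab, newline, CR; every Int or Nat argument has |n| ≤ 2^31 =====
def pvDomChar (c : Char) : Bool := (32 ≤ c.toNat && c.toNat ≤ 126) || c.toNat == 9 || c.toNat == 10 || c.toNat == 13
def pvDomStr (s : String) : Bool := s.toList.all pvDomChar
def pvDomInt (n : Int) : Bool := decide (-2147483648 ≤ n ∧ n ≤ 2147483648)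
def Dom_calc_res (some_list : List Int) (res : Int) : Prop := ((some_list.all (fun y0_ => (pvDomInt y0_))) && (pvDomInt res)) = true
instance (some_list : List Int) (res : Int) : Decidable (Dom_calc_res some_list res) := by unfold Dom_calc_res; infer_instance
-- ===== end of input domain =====

-- B composes each element's affine action on the accumulator right-to-left into coefficients (m, a) and returns m*res + a, instead of A's tail recursion threading the accumulator left-to-right; an alternative algorithm, same values.

-- ===== PORT A =====
-- literal transliteration of A: recursion on the list, branch order preserved
def calc_res (some_list : List Int) (res : Int) : Int :=
  match some_list with
  | [] => res
  | x :: rest =>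
    if x = 0 then calc_res rest res
    else if PySem.Int.mod x 2 = 0 then calc_res rest (x * res)
    else calc_res rest (res + x)

-- ===== PORT B =====
-- literal transliteration of B: reversed-iteration loop building (m, a), then m*res + a
def calc_res_alt (some_list : List Int) (res : Int) : Int :=
  let p := some_list.reverse.foldl (fun (p : Int × Int) x =>
    if x = 0 then p
    else if PySem.Int.mod x 2 = 0 then (p.1 * x, p.2)
    else (p.1, p.2 + p.1 * x)) (1, 0)
  p.1 * res + p.2

-- ===== PRECONDITION & SPEC =====
def Spec_calc_res (some_list : List Int) (res : Int) (out : Int) : Prop := out = calc_res_alt some_list res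
instance (some_list : List Int) (res : Int) (out : Int) : Decidable (Spec_calc_res some_list res out) := by unfold Spec_calc_res; infer_instance

-- ===== CLAIM =====
def Claim_equal_calc_res : Prop := ∀ (some_list : List Int) (res : Int), Dom_calc_res some_list res → Spec_calc_res some_list res (calc_res some_list res)

-- ===== LEMMAS AND PROOFS =====
-- the reversed foldl is a foldr over the original list
theorem alt_foldr (some_list : List Int) (res : Int) :
    calc_res_alt some_list res =
      (some_list.foldr (fun x (p : Int × Int) =>
        if x = 0 then p
        else if PySem.Int.mod x 2 = 0 then (p.1 * x, p.2)
        else (p.1, p.2 + p.1 * x)) (1, 0)).1 * res +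
      (some_list.foldr (fun x (p : Int × Int) =>
        if x = 0 then p
        else if PySem.Int.mod x 2 = 0 then (p.1 * x, p.2)
        else (p.1, p.2 + p.1 * x)) (1, 0)).2 := by
  simp [calc_res_alt, List.foldl_reverse]

theorem calc_res_eq_alt (some_list : List Int) (res : Int) :
    calc_res some_list res = calc_res_alt some_list res := by
  induction some_list generalizing res with
  | nil => simp [calc_res, calc_res_alt]
  | cons x rest ih =>
    simp only [alt_foldr] at ih ⊢
    simp only [calc_res, List.foldr_cons]
    split_ifs with h0 h2 <;> rw [ih] <;> ring

-- ===== VERDICT =====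
theorem calc_res_spec : Claim_equal_calc_res := by
  intro some_list res _
  exact calc_res_eq_alt some_list res
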